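-- pv_equiv track=rewrite | github.com/itsmemdtofik/Python | String/Easy/LongestUniformSubstring.py | repeated_substring
-- ===== SOURCE A (Python) =====
-- def repeated_substring(s: str) -> list[int]:
--     if not s:
--         return [-1, 0]
--
--     max_start = 0
--     max_length = 1
--     current_start = 0
--
--     for i in range(1, len(s)):
--         if s[i] == s[i - 1]:
--             if i - current_start + 1 > max_length:
--                 max_length = i - current_start + 1
--                 max_start = current_start
--         else:
--             current_start = i
--
--     return [max_start, max_length]
-- ===== SOURCE B (Python) =====
-- def repeated_substring(s: str) -> list[int]:
--     if not s:
--         return [-1, 0]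
--     # phase 1: split the string into its maximal uniform runs as (start, length)
--     runs = []
--     cur = s[0]
--     start = 0
--     length = 1
--     for ch in s[1:]:
--         if ch == cur:
--             length += 1
--         else:
--             runs.append((start, length))
--             cur = ch
--             start += length
--             length = 1
--     runs.append((start, length))
--     # phase 2: first run of maximal length
--     best_start, best_len = -1, 0
--     for st, ln in runs:
--         if ln > best_len:
--             best_start, best_len = st, ln
--     return [best_start, best_len]
-- ===== Notes on version B (the rewrite author's own statement) =====
-- stated objective: alternative
-- what changed: B decomposes the problem into two phases - it first segments the string into its maximal uniform runs as an explicit (start, length) list, then a separate max-scan picks the first longest run - instead of A's single index loop that compares s[i] with s[i-1] and updates the best incrementally via current_start.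
import Mathlib
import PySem

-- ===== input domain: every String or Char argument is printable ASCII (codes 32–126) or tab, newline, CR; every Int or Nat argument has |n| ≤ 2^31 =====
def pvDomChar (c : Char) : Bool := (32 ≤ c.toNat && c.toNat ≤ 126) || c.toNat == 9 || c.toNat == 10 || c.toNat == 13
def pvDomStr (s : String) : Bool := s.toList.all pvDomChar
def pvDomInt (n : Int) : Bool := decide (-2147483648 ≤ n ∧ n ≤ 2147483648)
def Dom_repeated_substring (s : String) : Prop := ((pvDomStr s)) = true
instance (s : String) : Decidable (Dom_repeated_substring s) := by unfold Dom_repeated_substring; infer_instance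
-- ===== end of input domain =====

-- B stores the string's maximal runs as an explicit list and then scans it for the
-- first longest run, instead of A's incremental single-loop best tracking.

-- ===== PORT A =====
-- literal port of A: one loop over i in range(1, len(s)) comparing s[i] with s[i-1];
-- both indices are always in range, so pyGetD's default is never used.
def repeated_substring (s : String) : List Int :=
  let cs := s.toList
  if cs = [] then [-1, 0]
  else
    let st := (PySem.List.pyRange 1 (cs.length : Int) 1).foldl
      (fun (st : Int × Int × Int) i =>
        if PySem.List.pyGetD cs i ' ' = PySem.List.pyGetD cs (i - 1) ' ' then
          if i - st.2.2 + 1 > st.2.1 then (st.2.2, i - st.2.2 + 1, st.2.2) else st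
        else (st.1, st.2.1, i))
      (0, 1, 0)
    [st.1, st.2.1]

-- ===== PORT B =====
-- phase 1 of Source B: the loop 'for ch in s[1:]' building the (start, length) run list
def pvRunsAux (cur : Char) (start length : Int) : List Char → List (Int × Int)
  | [] => [(start, length)]
  | ch :: t =>
    if ch = cur then pvRunsAux cur start (length + 1) t
    else (start, length) :: pvRunsAux ch (start + length) 1 t

-- phase 2 of Source B: first run of maximal length
def pvBest (b : Int × Int) (r : Int × Int) : Int × Int :=
  if r.2 > b.2 then r else b

def repeated_substring_alt (s : String) : List Int :=
  match s.toList with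
  | [] => [-1, 0]
  | c :: t =>
    let runs := pvRunsAux c 0 1 t
    let best := runs.foldl pvBest (-1, 0)
    [best.1, best.2]

-- ===== PRECONDITION & SPEC =====
def Spec_repeated_substring (s : String) (out : List Int) : Prop := out = repeated_substring_alt s
instance (s : String) (out : List Int) : Decidable (Spec_repeated_substring s out) := by unfold Spec_repeated_substring; infer_instance

-- ===== CLAIM (what is proved, stated in full; the proofs are below) =====
def Claim_equal_repeated_substring : Prop := ∀ (s : String), Dom_repeated_substring s → Spec_repeated_substring s (repeated_substring s)

-- ===== LEMMAS AND PROOFS =====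

-- A's loop, rewritten as structural recursion over the tail of the list:
-- prev is the previous character s[i-1], i the current index.
def pvProcA (prev : Char) (i : Int) (st : Int × Int × Int) : List Char → Int × Int × Int
  | [] => st
  | c :: t =>
    pvProcA c (i + 1)
      (if c = prev then
        if i - st.2.2 + 1 > st.2.1 then (st.2.2, i - st.2.2 + 1, st.2.2) else st
       else (st.1, st.2.1, i)) t

-- bridge: A's foldl over pyRange with indexed lookups equals pvProcA
theorem pvFoldl_eq_procA (t : List Char) : ∀ (pre : List Char) (prev : Char) (st : Int × Int × Int),
    (PySem.List.pyRange ((pre.length : Int) + 1) ((pre.length : Int) + 1 + (t.length : Int)) 1).foldl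
      (fun (st : Int × Int × Int) i =>
        if PySem.List.pyGetD (pre ++ prev :: t) i ' ' = PySem.List.pyGetD (pre ++ prev :: t) (i - 1) ' ' then
          if i - st.2.2 + 1 > st.2.1 then (st.2.2, i - st.2.2 + 1, st.2.2) else st
        else (st.1, st.2.1, i)) st
      = pvProcA prev ((pre.length : Int) + 1) st t := by
  induction t with
  | nil =>
    intro pre prev st
    rw [PySem.List.pyRange_one_eq_nil (by simp)]
    simp [pvProcA]
  | cons c t ih =>
    intro pre prev st
    rw [PySem.List.pyRange_one_cons (by push_cast [List.length_cons]; omega)]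
    rw [List.foldl_cons]
    have h1 : PySem.List.pyGetD (pre ++ prev :: c :: t) ((pre.length : Int) + 1) ' ' = c := by
      have h : ((pre.length : Int) + 1) = ((pre.length + 1 : Nat) : Int) := by push_cast; ring
      rw [h, PySem.List.pyGetD_natCast]
      simp [List.getD]
    have h2 : PySem.List.pyGetD (pre ++ prev :: c :: t) ((pre.length : Int) + 1 - 1) ' ' = prev := by
      have h : ((pre.length : Int) + 1 - 1) = ((pre.length : Nat) : Int) := by omega
      rw [h, PySem.List.pyGetD_natCast]
      simp [List.getD]
    rw [h1, h2]
    have hthis := ih (pre ++ [prev]) c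
      (if c = prev then
        if (pre.length : Int) + 1 - st.2.2 + 1 > st.2.1 then
          (st.2.2, (pre.length : Int) + 1 - st.2.2 + 1, st.2.2) else st
       else (st.1, st.2.1, (pre.length : Int) + 1))
    have hj : (((pre ++ [prev]).length : Nat) : Int) + 1 = (pre.length : Int) + 1 + 1 := by
      simp
    rw [hj] at hthis
    simp only [List.append_assoc, List.cons_append, List.nil_append] at hthis
    rw [pvProcA]
    have hlen : ((pre.length : Int) + 1 + ((c :: t).length : Int)) = (pre.length : Int) + 1 + 1 + (t.length : Int) := by
      push_cast [List.length_cons]; ring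
    rw [hlen]
    exact hthis

-- main invariant: A's incremental best over the current partial run equals
-- B's fold of pvBest over the completed runs.
theorem pvProc_eq_best (t : List Char) : ∀ (prev : Char) (cs curlen : Int) (b : Int × Int),
    1 ≤ curlen →
    ((pvProcA prev (cs + curlen) ((pvBest b (cs, curlen)).1, (pvBest b (cs, curlen)).2, cs) t).1,
     (pvProcA prev (cs + curlen) ((pvBest b (cs, curlen)).1, (pvBest b (cs, curlen)).2, cs) t).2.1)
      = (pvRunsAux prev cs curlen t).foldl pvBest b := by
  induction t with
  | nil =>
    intro prev cs curlen b h
    simp [pvProcA, pvRunsAux, pvBest]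
  | cons c t ih =>
    intro prev cs curlen b h
    rw [pvProcA, pvRunsAux]
    by_cases hc : c = prev
    · subst hc
      rw [if_pos rfl, if_pos rfl]
      have hst :
          (if cs + curlen - ((pvBest b (cs, curlen)).1, (pvBest b (cs, curlen)).2, cs).2.2 + 1 >
              ((pvBest b (cs, curlen)).1, (pvBest b (cs, curlen)).2, cs).2.1 then
            (((pvBest b (cs, curlen)).1, (pvBest b (cs, curlen)).2, cs).2.2,
              cs + curlen - ((pvBest b (cs, curlen)).1, (pvBest b (cs, curlen)).2, cs).2.2 + 1,
              ((pvBest b (cs, curlen)).1, (pvBest b (cs, curlen)).2, cs).2.2)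
           else ((pvBest b (cs, curlen)).1, (pvBest b (cs, curlen)).2, cs))
          = ((pvBest b (cs, curlen + 1)).1, (pvBest b (cs, curlen + 1)).2, cs) := by
        simp only [pvBest]
        split_ifs <;> simp_all <;> omega
      rw [hst]
      have hih := ih c cs (curlen + 1) b (by omega)
      rw [show cs + curlen + 1 = cs + (curlen + 1) by ring]
      exact hih
    · simp only [if_neg hc]
      have hb2 : 1 ≤ (pvBest b (cs, curlen)).2 := by
        simp only [pvBest]; split_ifs with hgt
        · exact h
        · simp at hgt; omega
      have hst :
          ((pvBest b (cs, curlen)).1, (pvBest b (cs, curlen)).2, cs + curlen)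
          = ((pvBest (pvBest b (cs, curlen)) (cs + curlen, 1)).1,
             (pvBest (pvBest b (cs, curlen)) (cs + curlen, 1)).2, cs + curlen) := by
        have : pvBest (pvBest b (cs, curlen)) (cs + curlen, 1) = pvBest b (cs, curlen) := by
          simp only [pvBest]; split_ifs <;> simp_all <;> omega
        rw [this]
      rw [hst]
      rw [List.foldl_cons]
      exact ih c (cs + curlen) 1 (pvBest b (cs, curlen)) (by omega)

-- ===== VERDICT (by name: the statement is the Claim_ definition above) =====
theorem repeated_substring_spec : Claim_equal_repeated_substring := by
  intro s _
  unfold Spec_repeated_substring repeated_substring repeated_substring_alt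
  cases hs : s.toList with
  | nil => simp
  | cons c t =>
    have hb : List.foldl
        (fun (st : Int × Int × Int) i =>
          if PySem.List.pyGetD (c :: t) i ' ' = PySem.List.pyGetD (c :: t) (i - 1) ' ' then
            if i - st.2.2 + 1 > st.2.1 then (st.2.2, i - st.2.2 + 1, st.2.2) else st
          else (st.1, st.2.1, i)) (0, 1, 0)
        (PySem.List.pyRange 1 ((t.length : Int) + 1) 1)
        = pvProcA c 1 (0, 1, 0) t := by
      have h := pvFoldl_eq_procA t [] c (0, 1, 0)
      rw [show ((([] : List Char).length : Int) + 1 + (t.length : Int)) = (t.length : Int) + 1 from by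
        simp; try ring] at h
      rw [show ((([] : List Char).length : Int) + 1) = (1 : Int) from by simp] at h
      exact h
    have hm := pvProc_eq_best t c 0 1 (-1, 0) (by norm_num)
    have hbest : pvBest (-1, 0) ((0 : Int), (1 : Int)) = ((0 : Int), (1 : Int)) := by
      simp [pvBest]
    rw [hbest] at hm
    norm_num at hm
    simp only [List.length_cons, reduceCtorEq, reduceIte]
    push_cast
    rw [hb]
    have h1 : (pvProcA c 1 ((0 : Int), (1 : Int), (0 : Int)) t).1
        = (List.foldl pvBest (-1, 0) (pvRunsAux c 0 1 t)).1 := by rw [← hm]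
    have h2 : (pvProcA c 1 ((0 : Int), (1 : Int), (0 : Int)) t).2.1
        = (List.foldl pvBest (-1, 0) (pvRunsAux c 0 1 t)).2 := by rw [← hm]
    rw [h1, h2]
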